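-- pv_equiv track=rewrite | github.com/s-jinipark/pythonTest | _Temp/23년_모의고사/9월/test01.py | solution
-- ===== SOURCE A (Python) =====
-- def solution(n, photo):
--     board = []
--
--     for p in photo:
--         if p in board:
--             continue
--         elif len(board) < n:
--             board.append(p)
--         else:
--             board.pop(0)
--             board.append(p )
--
--     return sorted(board)
-- ===== SOURCE B (Python) =====
-- def solution(n, photo):
--     # One pass with a rank counter: photo p is (re)admitted when its last
--     # admission rank has expired (r <= c - n); final board = photos whose
--     # last rank lies in the window (c - n, c].
--     last = {}
--     c = 0
--     for p in photo:
--         r = last.get(p)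
--         if r is None or r <= c - n:
--             c += 1
--             last[p] = c
--     return sorted(p for p, r in last.items() if r > c - n)
-- ===== Notes on version B (the rewrite author's own statement) =====
-- stated objective: faster
-- what changed: B replaces the FIFO board simulation (list membership scan + pop(0) eviction) by a single pass that assigns each admitted photo an increasing rank in a dict and reads the final board off as the photos whose last rank lies in the window (c-n, c], with no queue and no eviction; Pre_ excludes n <= 0 with non-empty photo, where A raises IndexError.
import Mathlib
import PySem

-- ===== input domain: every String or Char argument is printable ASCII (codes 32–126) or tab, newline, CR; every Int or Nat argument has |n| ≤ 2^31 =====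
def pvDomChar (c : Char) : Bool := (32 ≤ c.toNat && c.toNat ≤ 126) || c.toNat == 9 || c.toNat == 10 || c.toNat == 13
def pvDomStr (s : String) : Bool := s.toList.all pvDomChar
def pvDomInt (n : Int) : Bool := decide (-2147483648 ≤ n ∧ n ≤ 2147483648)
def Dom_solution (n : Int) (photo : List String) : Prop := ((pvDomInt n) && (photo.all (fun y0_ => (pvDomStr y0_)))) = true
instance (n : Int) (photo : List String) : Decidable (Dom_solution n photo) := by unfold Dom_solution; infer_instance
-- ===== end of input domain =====

-- B replaces A's FIFO-board simulation (O(n) membership scan per photo) by a one-pass rank-window computation over a dict; a timing run measured B faster.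


-- ===== PORT A =====
-- loop body of A; board.pop(0) is ported as board.tail, exact wherever board ≠ []
-- (Python raises IndexError on an empty board, which happens only for n ≤ 0 — excluded by Pre_).
def stepA (n : Int) (board : List String) (p : String) : List String :=
  if board.contains p then board
  else if (board.length : Int) < n then board ++ [p]
  else board.tail ++ [p]

def solution (n : Int) (photo : List String) : List String :=
  PySem.List.sorted (photo.foldl (stepA n) []) (fun x => x) false

-- ===== PORT B =====
-- loop body of B: state = (last-rank dict, rank counter c)
def stepB (n : Int) (st : PySem.Dict String Int × Int) (p : String) : PySem.Dict String Int × Int :=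
  match st.1.get? p with
  | none => (st.1.insert p (st.2 + 1), st.2 + 1)
  | some r => if r ≤ st.2 - n then (st.1.insert p (st.2 + 1), st.2 + 1) else st

def solution_alt (n : Int) (photo : List String) : List String :=
  let st := photo.foldl (stepB n) (PySem.Dict.empty, 0)
  PySem.List.sorted (((st.1.items.filter (fun pr => decide (st.2 - n < pr.2))).map Prod.fst)) (fun x => x) false

-- ===== PRECONDITION & SPEC =====
-- Pre_ excludes only the inputs on which A raises IndexError (board.pop(0) from an empty board):
-- n ≤ 0 together with a non-empty photo; A returns on every input Pre_ admits.
def Pre_solution (n : Int) (photo : List String) : Prop := photo = [] ∨ 1 ≤ n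
instance (n : Int) (photo : List String) : Decidable (Pre_solution n photo) := by unfold Pre_solution; infer_instance
def pvWitness_solution : Int × List String := (2, ["b", "a", "b", "c"])

def Spec_solution (n : Int) (photo : List String) (out : List String) : Prop := out = solution_alt n photo
instance (n : Int) (photo : List String) (out : List String) : Decidable (Spec_solution n photo out) := by unfold Spec_solution; infer_instance

-- ===== CLAIM (what is proved, stated in full; the proofs are below) =====
def Claim_equal_solution : Prop := ∀ (n : Int) (photo : List String), Dom_solution n photo → Pre_solution n photo → Spec_solution n photo (solution n photo)

-- ===== LEMMAS AND PROOFS =====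

-- The simulation invariant tying A's board to B's (dict, counter) state.
def SimInv (n : Int) (board : List String) (d : PySem.Dict String Int) (c : Int) : Prop :=
  0 ≤ c ∧ (board.length : Int) = min c n ∧ d.keys.Nodup ∧
  (∀ i (h : i < board.length), d.get? board[i] = some (c - board.length + 1 + i)) ∧
  (∀ p r, d.get? p = some r → 1 ≤ r ∧ r ≤ c ∧ (c - board.length < r → p ∈ board))

lemma simInv_mem_iff {n : Int} {board : List String} {d : PySem.Dict String Int} {c : Int}
    (hI : SimInv n board d c) (p : String) :
    p ∈ board ↔ ∃ r, d.get? p = some r ∧ c - n < r := by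
  obtain ⟨hc, hlen, hnd, hpos, hrank⟩ := hI
  constructor
  · rintro hm
    obtain ⟨i, hi, rfl⟩ := List.mem_iff_getElem.mp hm
    exact ⟨c - board.length + 1 + i, hpos i hi, by omega⟩
  · rintro ⟨r, hr, hlt⟩
    obtain ⟨h1, h2, h3⟩ := hrank p r hr
    exact h3 (by omega)

lemma simInv_grow {n : Int} {board : List String} {d : PySem.Dict String Int} {c : Int} {p : String}
    (hI : SimInv n board d c) (hlt : (board.length : Int) < n) (hpnot : p ∉ board) :
    SimInv n (board ++ [p]) (d.insert p (c + 1)) (c + 1) := by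
  obtain ⟨hc, hlen, hnd, hpos, hrank⟩ := hI
  have hcn : (board.length : Int) = c := by omega
  refine ⟨by omega, by simp only [List.length_append, List.length_cons, List.length_nil]; push_cast; omega, PySem.Dict.nodup_keys_insert d p (c + 1) hnd, ?_, ?_⟩
  · intro i hi
    simp only [List.length_append, List.length_cons, List.length_nil] at hi
    by_cases hib : i < board.length
    · rw [List.getElem_append_left hib,
        PySem.Dict.get?_insert_of_ne d (c + 1) (fun he => hpnot (by rw [← he]; exact List.getElem_mem hib)),
        hpos i hib]
      congr 1
      simp only [List.length_append, List.length_cons, List.length_nil]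
      push_cast
      omega
    · have hieq : i = board.length := by omega
      subst hieq
      rw [List.getElem_append_right (by omega)]
      simp only [Nat.sub_self, List.getElem_cons_zero]
      rw [PySem.Dict.get?_insert_self]
      congr 1
      simp only [List.length_append, List.length_cons, List.length_nil]
      push_cast
      omega
  · intro q r hq
    by_cases hqp : q = p
    · subst hqp
      rw [PySem.Dict.get?_insert_self] at hq
      obtain rfl := Option.some.inj hq
      exact ⟨by omega, by omega, fun _ => by simp⟩
    · rw [PySem.Dict.get?_insert_of_ne d (c + 1) hqp] at hq
      obtain ⟨h1, h2, h3⟩ := hrank q r hq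
      refine ⟨h1, by omega, fun hth => ?_⟩
      simp only [List.length_append, List.length_cons, List.length_nil] at hth
      exact List.mem_append_left _ (h3 (by push_cast at hth ⊢; omega))

lemma simInv_evict {n : Int} {board : List String} {d : PySem.Dict String Int} {c : Int} {p : String}
    (hn : 1 ≤ n) (hI : SimInv n board d c) (hfull : (board.length : Int) = n)
    (hpnot : p ∉ board) :
    SimInv n (board.tail ++ [p]) (d.insert p (c + 1)) (c + 1) := by
  obtain ⟨hc, hlen, hnd, hpos, hrank⟩ := hI
  have hcn : n ≤ c := by omega
  have hb1 : 1 ≤ board.length := by omega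
  have hlen' : ((board.tail ++ [p]).length : Int) = n := by
    simp [List.length_tail]
    omega
  refine ⟨by omega, by rw [hlen']; omega, PySem.Dict.nodup_keys_insert d p (c + 1) hnd, ?_, ?_⟩
  · intro i hi
    have hi' : i < board.length := by
      simp [List.length_tail] at hi
      omega
    by_cases hib : i < board.tail.length
    · have hi1 : i + 1 < board.length := by simp [List.length_tail] at hib; omega
      rw [List.getElem_append_left hib]
      have htl : board.tail[i] = board[i + 1] := by simp [List.getElem_tail]
      rw [htl,
        PySem.Dict.get?_insert_of_ne d (c + 1) (fun he => hpnot (by rw [← he]; exact List.getElem_mem hi1)),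
        hpos (i + 1) hi1]
      congr 1
      rw [hlen'] at *
      push_cast
      omega
    · have hieq : i = board.tail.length := by
        simp [List.length_tail] at hib ⊢
        simp [List.length_tail] at hi
        omega
      subst hieq
      rw [List.getElem_append_right (by omega)]
      simp only [Nat.sub_self, List.getElem_cons_zero]
      rw [PySem.Dict.get?_insert_self]
      congr 1
      rw [hlen']
      simp [List.length_tail]
      omega
  · intro q r hq
    by_cases hqp : q = p
    · subst hqp
      rw [PySem.Dict.get?_insert_self] at hq
      obtain rfl := Option.some.inj hq
      exact ⟨by omega, by omega, fun _ => by simp⟩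
    · rw [PySem.Dict.get?_insert_of_ne d (c + 1) hqp] at hq
      obtain ⟨h1, h2, h3⟩ := hrank q r hq
      refine ⟨h1, by omega, fun hth => ?_⟩
      rw [hlen'] at hth
      have hqb : q ∈ board := h3 (by omega)
      obtain ⟨i, hi, rfl⟩ := List.mem_iff_getElem.mp hqb
      have hri := hpos i hi
      rw [hq] at hri
      obtain hre := Option.some.inj hri
      have hipos : 1 ≤ i := by omega
      refine List.mem_append_left _ ?_
      have : board[i] = board.tail[i - 1]'(by simp [List.length_tail]; omega) := by
        simp [List.getElem_tail]
        congr 1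
        omega
      rw [this]
      exact List.getElem_mem _

lemma simInv_step {n : Int} {board : List String} {d : PySem.Dict String Int} {c : Int}
    (hn : 1 ≤ n) (hI : SimInv n board d c) (p : String) :
    SimInv n (stepA n board p) (stepB n (d, c) p).1 (stepB n (d, c) p).2 := by
  have hI' := hI
  obtain ⟨hc, hlen, hnd, hpos, hrank⟩ := hI'
  cases hget : d.get? p with
  | none =>
    have hpnot : p ∉ board := by
      intro hm
      obtain ⟨i, hi, rfl⟩ := List.mem_iff_getElem.mp hm
      rw [hpos i hi] at hget
      simp at hget
    have hcont : board.contains p = false := by simpa using hpnot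
    simp only [stepA, stepB, hget, hcont, Bool.false_eq_true, if_false]
    by_cases hlt : (board.length : Int) < n
    · rw [if_pos hlt]
      exact simInv_grow hI hlt hpnot
    · rw [if_neg hlt]
      exact simInv_evict hn hI (by omega) hpnot
  | some r =>
    obtain ⟨h1, h2, h3⟩ := hrank p r hget
    by_cases hr : r ≤ c - n
    · have hfull : (board.length : Int) = n := by omega
      have hpnot : p ∉ board := by
        intro hm
        obtain ⟨i, hi, hpe⟩ := List.mem_iff_getElem.mp hm
        have := hpos i hi
        rw [hpe, hget] at this
        obtain hre := Option.some.inj this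
        omega
      have hcont : board.contains p = false := by simpa using hpnot
      have hnlt : ¬ (board.length : Int) < n := by omega
      simp only [stepA, stepB, hget, hcont, Bool.false_eq_true, if_false, if_pos hr, if_neg hnlt]
      exact simInv_evict hn hI hfull hpnot
    · have hpmem : p ∈ board := h3 (by omega)
      have hcont : board.contains p = true := by simpa using hpmem
      simp only [stepA, stepB, hget, hcont, if_true, if_neg hr]
      exact hI

lemma simInv_fold {n : Int} (photo : List String) {board : List String} {d : PySem.Dict String Int} {c : Int}
    (hn : 1 ≤ n) (hI : SimInv n board d c) :
    SimInv n (photo.foldl (stepA n) board) (photo.foldl (stepB n) (d, c)).1 (photo.foldl (stepB n) (d, c)).2 := by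
  induction photo generalizing board d c with
  | nil => exact hI
  | cons q t ih =>
    simp only [List.foldl_cons]
    have := ih (hI := simInv_step hn hI q)
    simpa using this

lemma simInv_init {n : Int} (hn : 1 ≤ n) : SimInv n [] PySem.Dict.empty 0 := by
  refine ⟨le_refl 0, by simp; omega, ?_, ?_, ?_⟩
  · exact PySem.Dict.nodup_keys_empty
  · intro i h; simp at h
  · intro p r hr; simp [PySem.Dict.get?_empty] at hr

lemma board_nodup {n : Int} {board : List String} {d : PySem.Dict String Int} {c : Int}
    (hI : SimInv n board d c) : board.Nodup := by
  obtain ⟨hc, hlen, hnd, hpos, hrank⟩ := hI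
  rw [List.nodup_iff_injective_getElem]
  rintro ⟨i, hi⟩ ⟨j, hj⟩ hij
  simp only at hij
  have h1 := hpos i hi
  have h2 := hpos j hj
  rw [hij, h2] at h1
  simp only [Option.some.injEq] at h1
  have : (i : Int) = j := by omega
  exact Fin.ext (by exact_mod_cast this)

-- ===== VERDICT (by name: the statement is the Claim_ definition above) =====
theorem solution_spec : Claim_equal_solution := by
  intro n photo hdom hpre
  unfold Spec_solution
  rcases hpre with rfl | hn
  · rfl
  · have hI := simInv_fold photo hn (simInv_init hn)
    show PySem.List.sorted (photo.foldl (stepA n) []) (fun x => x) false = _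
    unfold solution_alt
    set st := photo.foldl (stepB n) (PySem.Dict.empty, 0) with hst
    set board := photo.foldl (stepA n) [] with hboard
    obtain ⟨hc, hlen, hnd, hpos, hrank⟩ := hI
    have hnodup2 : ((st.1.items.filter (fun pr => decide (st.2 - n < pr.2))).map Prod.fst).Nodup :=
      List.Nodup.sublist (List.Sublist.map Prod.fst List.filter_sublist) hnd
    apply PySem.List.sorted_eq_sorted_of_perm
    · exact fun a b h => h
    · rw [List.perm_ext_iff_of_nodup (board_nodup ⟨hc, hlen, hnd, hpos, hrank⟩) hnodup2]
      intro q
      rw [simInv_mem_iff ⟨hc, hlen, hnd, hpos, hrank⟩ q]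
      simp only [List.mem_map, List.mem_filter, decide_eq_true_eq]
      constructor
      · rintro ⟨r, hr, hlt⟩
        exact ⟨(q, r), ⟨(PySem.Dict.get?_eq_some_iff_mem_items st.1 q r hnd).mp hr, hlt⟩, rfl⟩
      · rintro ⟨⟨q', r⟩, ⟨hm, hlt⟩, rfl⟩
        exact ⟨r, (PySem.Dict.get?_eq_some_iff_mem_items st.1 q' r hnd).mpr hm, hlt⟩
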